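-- pv_equiv track=rewrite | github.com/Polymathera/colony | src/polymathera/colony/agents/patterns/capabilities/web_search.py | _hostname_matches
-- ===== SOURCE A (Python) =====
-- def _hostname_matches(host: str | None, patterns: tuple[str, ...]) -> bool:
--     """Case-insensitive suffix match on the hostname.
--
--     ``example.com`` matches ``sub.example.com`` but not ``fakeexample.com``.
--     """
--     if not host:
--         return False
--     h = host.lower()
--     for p in patterns:
--         p = p.lower()
--         if h == p or h.endswith(f".{p}"):
--             return True
--     return False
-- ===== SOURCE B (Python) =====
-- def _hostname_matches(host, patterns):
--     """Case-insensitive suffix match on the hostname, via a precomputed suffix set.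
--
--     Collect every label-boundary suffix of the host (the whole host plus the part
--     after each '.'), then just look each lowered pattern up in that set.
--     """
--     if not host:
--         return False
--     h = host.lower()
--     suffixes = {h}
--     for i, c in enumerate(h):
--         if c == '.':
--             suffixes.add(h[i + 1:])
--     return any(p.lower() in suffixes for p in patterns)
-- ===== Notes on version B (the rewrite author's own statement) =====
-- stated objective: alternative
-- what changed: Instead of testing each pattern with equality/endswith against the host, B precomputes the set of all label-boundary suffixes of the lowered host in one pass and answers each pattern by a set-membership lookup.
import Mathlib
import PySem

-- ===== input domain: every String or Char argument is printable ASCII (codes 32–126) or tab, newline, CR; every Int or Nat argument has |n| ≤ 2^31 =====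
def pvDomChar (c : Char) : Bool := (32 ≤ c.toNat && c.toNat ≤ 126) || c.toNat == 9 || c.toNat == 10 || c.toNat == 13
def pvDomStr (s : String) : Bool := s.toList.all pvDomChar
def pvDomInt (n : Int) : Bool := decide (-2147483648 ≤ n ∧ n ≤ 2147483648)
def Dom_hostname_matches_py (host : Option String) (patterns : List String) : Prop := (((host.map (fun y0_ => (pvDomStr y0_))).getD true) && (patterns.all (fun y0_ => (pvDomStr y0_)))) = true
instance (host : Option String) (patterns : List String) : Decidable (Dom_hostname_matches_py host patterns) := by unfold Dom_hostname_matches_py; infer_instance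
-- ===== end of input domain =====

-- B replaces the per-pattern equality/endswith tests by a precomputed set of the
-- host's label-boundary suffixes looked up per pattern (alternative decomposition).

-- ===== PORT A =====
-- the 'for p in patterns' loop of A
def hmA_loop (h : List Char) (ps : List String) : Bool :=
  match ps with
  | [] => false
  | p :: rest =>
    let pl := PySem.Chars.lower p.toList
    if h = pl ∨ PySem.Chars.endswith h ('.' :: pl) = true then true
    else hmA_loop h rest

def hostname_matches_py (host : Option String) (patterns : List String) : Bool :=
  match host with
  | none => false
  | some s =>
    if s.toList = [] then false
    else hmA_loop (PySem.Chars.lower s.toList) patterns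

-- ===== PORT B =====
-- the 'for i, c in enumerate(h)' loop of B building the suffix set
def hmB_sufs (h : List Char) : PySem.Set (List Char) :=
  (PySem.List.enumerate h).foldl
    (fun s ic =>
      if ic.2 = '.' then s.add (PySem.List.slice h (some (ic.1 + 1)) none) else s)
    (PySem.Set.ofList [h])

def hostname_matches_py_alt (host : Option String) (patterns : List String) : Bool :=
  match host with
  | none => false
  | some s =>
    if s.toList = [] then false
    else
      let h := PySem.Chars.lower s.toList
      let suffixes := hmB_sufs h
      patterns.any (fun p => suffixes.contains (PySem.Chars.lower p.toList))

-- ===== PRECONDITION & SPEC =====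
def Spec_hostname_matches_py (host : Option String) (patterns : List String) (out : Bool) : Prop := out = hostname_matches_py_alt host patterns
instance (host : Option String) (patterns : List String) (out : Bool) : Decidable (Spec_hostname_matches_py host patterns out) := by unfold Spec_hostname_matches_py; infer_instance

-- ===== CLAIM (what is proved, stated in full; the proofs are below) =====
def Claim_equal_hostname_matches_py : Prop := ∀ (host : Option String) (patterns : List String), Dom_hostname_matches_py host patterns → Spec_hostname_matches_py host patterns (hostname_matches_py host patterns)

-- ===== LEMMAS AND PROOFS =====

-- membership in B's fold: the initial set plus the suffix of h after each dot of the remaining tail t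
theorem mem_hmB_fold (h : List Char) :
    ∀ (t : List Char) (s : Nat) (acc : PySem.Set (List Char)) (x : List Char),
      List.drop s h = t →
      (x ∈ (PySem.List.enumerate t (s : Int)).foldl
          (fun s ic =>
            if ic.2 = '.' then s.add (PySem.List.slice h (some (ic.1 + 1)) none) else s)
          acc
        ↔ x ∈ acc ∨ ('.' :: x) <:+ t) := by
  intro t
  induction t with
  | nil =>
    intro s acc x _
    simp only [PySem.List.enumerate_nil, List.foldl_nil]
    constructor
    · exact Or.inl
    · rintro (hx | hx)
      · exact hx
      · exact absurd hx.length_le (by simp)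
  | cons c t ih =>
    intro s acc x hdrop
    have hdrop1 : List.drop (s + 1) h = t := by
      have := congrArg (List.drop 1) hdrop
      simpa [List.drop_drop, Nat.add_comm] using this
    have hslice : PySem.List.slice h (some ((s : Int) + 1)) none = t := by
      rw [PySem.List.slice_from h (by omega)]
      have h1 : ((s : Int) + 1).toNat = s + 1 := by omega
      rw [h1, hdrop1]
    have hcast : (s : Int) + 1 = ((s + 1 : Nat) : Int) := by push_cast; ring
    rw [PySem.List.enumerate_cons]
    simp only [List.foldl_cons]
    rw [List.suffix_cons_iff]
    by_cases hc : c = '.'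
    · subst hc
      rw [if_pos rfl, hslice, hcast, ih (s + 1) _ x hdrop1, PySem.Set.mem_add]
      simp only [List.cons.injEq, true_and]
      tauto
    · rw [if_neg (by simpa using hc), hcast, ih (s + 1) _ x hdrop1]
      have : ¬ ('.' :: x = c :: t) := fun hx => hc (List.head_eq_of_cons_eq hx).symm
      tauto

-- B's suffix set holds exactly the host itself and the suffix after each dot
theorem mem_hmB_sufs (h x : List Char) : x ∈ hmB_sufs h ↔ x = h ∨ ('.' :: x) <:+ h := by
  unfold hmB_sufs
  have h0 : List.drop 0 h = h := by simp
  have := mem_hmB_fold h h 0 (PySem.Set.ofList [h]) x h0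
  rw [show ((0 : Nat) : Int) = 0 by rfl] at this
  rw [this, PySem.Set.mem_ofList]
  simp

-- one pattern: A's equality/endswith test equals B's set lookup
theorem pat_iff (h pl : List Char) :
    (h = pl ∨ PySem.Chars.endswith h ('.' :: pl) = true) ↔ (hmB_sufs h).contains pl = true := by
  rw [PySem.Set.contains_iff, mem_hmB_sufs, PySem.Chars.endswith_iff, eq_comm]

-- A's pattern loop equals B's any-of-lookups
theorem loop_eq (h : List Char) (ps : List String) :
    hmA_loop h ps = ps.any (fun p => (hmB_sufs h).contains (PySem.Chars.lower p.toList)) := by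
  induction ps with
  | nil => rfl
  | cons p rest ih =>
    simp only [hmA_loop, List.any_cons]
    by_cases hc : (h = PySem.Chars.lower p.toList ∨
        PySem.Chars.endswith h ('.' :: PySem.Chars.lower p.toList) = true)
    · rw [if_pos hc, (pat_iff h _).mp hc, Bool.true_or]
    · rw [if_neg hc, ih]
      have : (hmB_sufs h).contains (PySem.Chars.lower p.toList) = false := by
        rw [← Bool.not_eq_true]
        exact fun hm => hc ((pat_iff h _).mpr hm)
      rw [this, Bool.false_or]

-- ===== VERDICT (by name: the statement is the Claim_ definition above) =====
theorem hostname_matches_py_spec : Claim_equal_hostname_matches_py := by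
  intro host patterns _
  unfold Spec_hostname_matches_py hostname_matches_py hostname_matches_py_alt
  cases host with
  | none => rfl
  | some s =>
    by_cases hs : s.toList = []
    · simp [hs]
    · simp only [if_neg hs]
      exact loop_eq _ _
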